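-- pv_equiv track=rewrite | github.com/roshan-rm01/Python-projects | Projected.py | special_char
-- ===== SOURCE A (Python) =====
-- special = ["!", "@", "#", "$", "&", "*"]
--
-- def special_char(word):
--     z = 0
--     if len(word) > 7:
--         for i in special:
--             if i in word:
--                 z += 1
--                 if z >= 2:
--                     return True
-- ===== SOURCE B (Python) =====
-- def special_char(word):
--     if len(word) > 7:
--         seen = set()
--         for ch in word:
--             if ch in {"!", "@", "#", "$", "&", "*"}:
--                 seen.add(ch)
--                 if len(seen) >= 2:
--                     return True
-- ===== Notes on version B (the rewrite author's own statement) =====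
-- stated objective: simpler
-- what changed: Instead of scanning the word once per special character with an integer counter, B makes a single pass over the word's characters maintaining a set of distinct special characters seen, returning True as soon as two are seen.
import Mathlib
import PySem

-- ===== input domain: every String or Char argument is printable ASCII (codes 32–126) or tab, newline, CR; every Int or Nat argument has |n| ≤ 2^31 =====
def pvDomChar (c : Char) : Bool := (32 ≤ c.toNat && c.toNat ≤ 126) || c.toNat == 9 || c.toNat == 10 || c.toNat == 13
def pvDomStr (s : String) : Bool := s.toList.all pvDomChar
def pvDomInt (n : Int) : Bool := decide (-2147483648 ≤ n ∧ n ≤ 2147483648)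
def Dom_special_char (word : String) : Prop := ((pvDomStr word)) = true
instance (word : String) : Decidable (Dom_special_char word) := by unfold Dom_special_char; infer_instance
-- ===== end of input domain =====

-- B replaces A's per-special-character substring scans and integer counter by one pass
-- over the word with a set of distinct special characters seen (objective: simpler).

-- ===== PORT A =====
def pvSpecials : List String := ["!", "@", "#", "$", "&", "*"]

-- 'for i in special: if i in word: z += 1; if z >= 2: return True'
def pvLoopA (w : List Char) : List String → Int → Option Bool
  | [], _ => none
  | i :: rest, z =>
    if PySem.Chars.isIn i.toList w then
      if z + 1 ≥ 2 then some true else pvLoopA w rest (z + 1)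
    else pvLoopA w rest z

def special_char (word : String) : Option Bool :=
  if PySem.Str.len word > 7 then pvLoopA word.toList pvSpecials 0 else none

-- ===== PORT B =====
def pvSpecialSet : PySem.Set Char := PySem.Set.ofList ['!', '@', '#', '$', '&', '*']

-- 'for ch in word: if ch in {...}: seen.add(ch); if len(seen) >= 2: return True'
def pvLoopB : List Char → PySem.Set Char → Option Bool
  | [], _ => none
  | c :: rest, seen =>
    if PySem.Set.contains pvSpecialSet c then
      let seen' := PySem.Set.add seen c
      if PySem.Set.len seen' ≥ 2 then some true else pvLoopB rest seen'
    else pvLoopB rest seen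

def special_char_alt (word : String) : Option Bool :=
  if PySem.Str.len word > 7 then pvLoopB word.toList PySem.Set.empty else none

-- ===== PRECONDITION & SPEC =====
def Spec_special_char (word : String) (out : Option Bool) : Prop := out = special_char_alt word
instance (word : String) (out : Option Bool) : Decidable (Spec_special_char word out) := by unfold Spec_special_char; infer_instance

-- ===== CLAIM (what is proved, stated in full; the proofs are below) =====
def Claim_equal_special_char : Prop := ∀ (word : String), Dom_special_char word → Spec_special_char word (special_char word)

-- ===== LEMMAS AND PROOFS =====

def pvSpecialChars : List Char := ['!', '@', '#', '$', '&', '*']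

-- [c] is an infix of s iff c is a member of s
theorem pv_isIn_singleton (c : Char) (s : List Char) :
    PySem.Chars.isIn [c] s = decide (c ∈ s) := by
  by_cases h : c ∈ s
  · obtain ⟨l, r, rfl⟩ := List.append_of_mem h
    simp [h]
    rw [PySem.Chars.isIn_iff_infix]
    exact ⟨l, r, by simp⟩
  · simp [h]
    rw [PySem.Chars.isIn_eq_false_iff]
    intro hinf
    exact h (hinf.sublist.subset (by simp))

-- A's counter loop characterised: some true iff z plus the number of
-- remaining special strings occurring in w reaches 2, else none
theorem pv_loopA_char (w : List Char) (l : List String) (z : Int)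
    (h0 : 0 ≤ z) (h1 : z ≤ 1) :
    pvLoopA w l z =
      if 2 ≤ z + ((l.filter (fun i => PySem.Chars.isIn i.toList w)).length : Int)
      then some true else none := by
  induction l generalizing z with
  | nil => simp [pvLoopA]; omega
  | cons i rest ih =>
    by_cases hi : PySem.Chars.isIn i.toList w = true
    · by_cases hz : z + 1 ≥ 2
      · have hz1 : z = 1 := by omega
        subst hz1
        simp only [pvLoopA, hi, if_true, if_pos hz, List.filter_cons, List.length_cons]
        rw [if_pos (by push_cast; omega)]
      · have hz0 : z = 0 := by omega
        subst hz0
        simp only [pvLoopA, hi, if_true, if_neg hz]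
        rw [ih (0 + 1) (by omega) (by omega)]
        simp only [List.filter_cons, hi, if_true, List.length_cons]
        by_cases hr : 2 ≤ (0:Int) + 1 + ((rest.filter (fun i => PySem.Chars.isIn i.toList w)).length : Int)
        · rw [if_pos hr, if_pos (by push_cast at hr ⊢; omega)]
        · rw [if_neg hr, if_neg (by push_cast at hr ⊢; omega)]
    · simp only [pvLoopA, hi, Bool.false_eq_true, if_false]
      rw [ih z h0 h1]
      simp [hi]

-- adding an element does not shrink a set
theorem pv_length_le_add (s : PySem.Set Char) (c : Char) :
    s.length ≤ (PySem.Set.add s c).length := by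
  unfold PySem.Set.add
  split <;> simp

-- folding add over a list does not shrink a set
theorem pv_length_le_foldl_add (l : List Char) (s : PySem.Set Char) :
    s.length ≤ (l.foldl PySem.Set.add s).length := by
  induction l generalizing s with
  | nil => simp
  | cons c rest ih => exact le_trans (pv_length_le_add s c) (ih _)

-- B's seen-set loop characterised
theorem pv_loopB_char (chars : List Char) (seen : PySem.Set Char)
    (h1 : seen.length ≤ 1) :
    pvLoopB chars seen =
      if 2 ≤ ((chars.filter (fun c => PySem.Set.contains pvSpecialSet c)).foldl
                PySem.Set.add seen).length
      then some true else none := by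
  induction chars generalizing seen with
  | nil => simp only [pvLoopB, List.filter_nil, List.foldl_nil]
           rw [if_neg (by omega)]
  | cons c rest ih =>
    by_cases hc : PySem.Set.contains pvSpecialSet c = true
    · by_cases h2 : PySem.Set.len (PySem.Set.add seen c) ≥ 2
      · have hge : 2 ≤ ((rest.filter (fun c => PySem.Set.contains pvSpecialSet c)).foldl
            PySem.Set.add (PySem.Set.add seen c)).length := by
          have hm := pv_length_le_foldl_add
            (rest.filter (fun c => PySem.Set.contains pvSpecialSet c)) (PySem.Set.add seen c)
          simp only [PySem.Set.len, ge_iff_le] at h2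
          omega
        simp only [pvLoopB, hc, if_true, if_pos h2, List.filter_cons, List.foldl_cons]
        rw [if_pos hge]
      · have hlen : (PySem.Set.add seen c).length ≤ 1 := by
          simp only [PySem.Set.len, ge_iff_le] at h2; omega
        simp only [pvLoopB, hc, if_true, if_neg h2]
        rw [ih _ hlen]
        simp only [List.filter_cons, hc, if_true, List.foldl_cons]
    · simp only [pvLoopB, hc, Bool.false_eq_true, if_false]
      rw [ih seen h1]
      simp only [List.filter_cons, hc, Bool.false_eq_true, if_false]

-- the special-string list is the special chars, each as a one-char string
theorem pv_specials_map : pvSpecials = pvSpecialChars.map (fun c => String.ofList [c]) := by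
  decide

-- the two counts agree: number of special strings occurring in w
-- = number of distinct special characters of w
theorem pv_counts_eq (w : List Char) :
    (pvSpecials.filter (fun i => PySem.Chars.isIn i.toList w)).length =
    (PySem.Set.ofList (w.filter (fun c => PySem.Set.contains pvSpecialSet c))).length := by
  rw [pv_specials_map, List.filter_map, List.length_map]
  have hpred : ∀ c : Char,
      (PySem.Chars.isIn (String.ofList [c]).toList w) = decide (c ∈ w) := by
    intro c
    rw [String.toList_ofList, pv_isIn_singleton]
  have hL : (pvSpecialChars.filter
      (fun c => PySem.Chars.isIn (String.ofList [c]).toList w)) =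
      pvSpecialChars.filter (fun c => decide (c ∈ w)) :=
    List.filter_congr (fun c _ => hpred c)
  simp only [Function.comp_def, hL]
  have hnodupL : (pvSpecialChars.filter (fun c => decide (c ∈ w))).Nodup :=
    List.Nodup.filter _ (by decide)
  have hnodupR : (PySem.Set.ofList
      (w.filter (fun c => PySem.Set.contains pvSpecialSet c))).Nodup :=
    PySem.Set.nodup_ofList _
  rw [← List.toFinset_card_of_nodup hnodupL, ← List.toFinset_card_of_nodup hnodupR]
  congr 1
  apply Finset.ext
  intro x
  simp only [List.mem_toFinset, List.mem_filter, PySem.Set.mem_ofList,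
    PySem.Set.contains_iff, decide_eq_true_eq]
  constructor
  · rintro ⟨hx, hw⟩
    exact ⟨hw, by simpa [pvSpecialSet, pvSpecialChars, PySem.Set.mem_ofList] using hx⟩
  · rintro ⟨hw, hx⟩
    exact ⟨by simpa [pvSpecialSet, pvSpecialChars, PySem.Set.mem_ofList] using hx, hw⟩

-- ===== VERDICT (by name: the statement is the Claim_ definition above) =====
theorem special_char_spec : Claim_equal_special_char := by
  intro word _
  unfold Spec_special_char special_char special_char_alt
  by_cases hlen : PySem.Str.len word > 7
  · rw [if_pos hlen, if_pos hlen]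
    rw [pv_loopA_char word.toList pvSpecials 0 (by omega) (by omega),
        pv_loopB_char word.toList PySem.Set.empty (by simp [PySem.Set.empty])]
    rw [show PySem.Set.empty = ([] : PySem.Set Char) from rfl,
        ← PySem.Set.ofList_eq_foldl, ← pv_counts_eq word.toList]
    by_cases h : 2 ≤ (pvSpecials.filter
        (fun i => PySem.Chars.isIn i.toList word.toList)).length
    · rw [if_pos (by omega), if_pos h]
    · rw [if_neg (by omega), if_neg h]
  · rw [if_neg hlen, if_neg hlen]
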